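-- pv_equiv track=rewrite | github.com/rdisho20/ls-core | py119/practice_problems_2/study8_3.py | can_form_target
-- ===== SOURCE A (Python) =====
-- def concat_str_list(string_list):
--     result = ""
--     for string in string_list:
--         for char in string:
--             result += char
--
--     return result
--
-- def get_char_count(string):
--     dictionary = {}
--     for char in string:
--         dictionary[char] = dictionary.get(char, 0) + 1
--
--     return dictionary
--
-- def can_form_target(string_list, target):
--     check_string = concat_str_list(string_list)
--     check_string_char_count = get_char_count(check_string)
--     target_char_count = get_char_count(target)
--
--     for char, count in target_char_count.items():
--         if char not in check_string_char_count:
--             return False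
--
--         if char in check_string_char_count:
--             if count > check_string_char_count[char]:
--                 return False
--
--     # if all cases pass the above tests, should return True
--     return True
-- ===== SOURCE B (Python) =====
-- def can_form_target(string_list, target):
--     pool = sorted("".join(string_list))
--     need = sorted(target)
--     j = 0
--     n = len(pool)
--     for ch in need:
--         while j < n and pool[j] != ch:
--             j += 1
--         if j == n:
--             return False
--         j += 1
--     return True
-- ===== Notes on version B (the rewrite author's own statement) =====
-- stated objective: alternative
-- what changed: Replaced the two character-frequency dictionaries and the per-key count comparison with a sort-then-single-merge: both the pooled characters and the target are sorted and a two-pointer scan checks the sorted target is a subsequence of the sorted pool.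
import Mathlib
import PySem

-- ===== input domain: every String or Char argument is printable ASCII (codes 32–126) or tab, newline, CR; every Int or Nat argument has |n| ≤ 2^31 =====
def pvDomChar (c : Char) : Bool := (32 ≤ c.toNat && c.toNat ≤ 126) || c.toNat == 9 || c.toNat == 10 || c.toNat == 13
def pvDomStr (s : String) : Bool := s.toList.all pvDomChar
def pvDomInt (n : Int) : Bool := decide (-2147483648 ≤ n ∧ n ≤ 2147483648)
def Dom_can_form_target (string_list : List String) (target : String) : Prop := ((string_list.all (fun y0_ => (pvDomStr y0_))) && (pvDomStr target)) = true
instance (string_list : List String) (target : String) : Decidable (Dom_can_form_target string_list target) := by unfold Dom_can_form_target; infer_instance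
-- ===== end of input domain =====

-- B replaces A's two frequency dictionaries by sort-then-merge (two-pointer subsequence check on the sorted pool and sorted target); alternative algorithm, not claimed faster.

-- ===== PORT A =====
-- result += char over every string of the list
def concat_str_list (string_list : List String) : String :=
  String.ofList (string_list.foldl (fun result s => s.toList.foldl (fun r c => r ++ [c]) result) [])

-- dictionary[char] = dictionary.get(char, 0) + 1
def get_char_count (s : String) : PySem.Dict Char Int :=
  s.toList.foldl (fun d c => d.insert c (d.getD c 0 + 1)) PySem.Dict.empty

def can_form_target (string_list : List String) (target : String) : Bool :=
  let check_string := concat_str_list string_list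
  let check_string_char_count := get_char_count check_string
  let target_char_count := get_char_count target
  -- the for-loop with early 'return False's: all items must pass both tests
  -- (the lookup check_string_char_count[char] is guarded by 'char in', so getD is exact here)
  target_char_count.items.all (fun kv =>
    if ¬ check_string_char_count.contains kv.1 then false
    else if kv.2 > check_string_char_count.getD kv.1 0 then false
    else true)

-- ===== PORT B =====
-- the for/while two-pointer scan of Source B: consume sorted-pool chars until each sorted-target char is matched
def cft_merge : List Char → List Char → Bool
  | [], _ => true
  | _ :: _, [] => false
  | c :: cs, p :: ps => if p = c then cft_merge cs ps else cft_merge (c :: cs) ps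
  termination_by _ pool => pool.length

def can_form_target_alt (string_list : List String) (target : String) : Bool :=
  let pool := PySem.List.sorted ((string_list.map String.toList).flatten) (fun x => x) false
  let need := PySem.List.sorted target.toList (fun x => x) false
  cft_merge need pool

-- ===== PRECONDITION & SPEC =====
def Spec_can_form_target (string_list : List String) (target : String) (out : Bool) : Prop := out = can_form_target_alt string_list target
instance (string_list : List String) (target : String) (out : Bool) : Decidable (Spec_can_form_target string_list target out) := by unfold Spec_can_form_target; infer_instance

-- ===== CLAIM (what is proved, stated in full; the proofs are below) =====
def Claim_equal_can_form_target : Prop := ∀ (string_list : List String) (target : String), Dom_can_form_target string_list target → Spec_can_form_target string_list target (can_form_target string_list target)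

-- ===== LEMMAS AND PROOFS =====

theorem concat_foldl (sl : List String) (acc : List Char) :
    sl.foldl (fun result s => s.toList.foldl (fun r c => r ++ [c]) result) acc
      = acc ++ (sl.map String.toList).flatten := by
  induction sl generalizing acc with
  | nil => simp
  | cons x xs ih =>
    rw [List.foldl_cons, PySem.List.foldl_append_singleton, ih]
    simp

theorem concat_toList (sl : List String) :
    (concat_str_list sl).toList = (sl.map String.toList).flatten := by
  unfold concat_str_list
  rw [String.toList_ofList, concat_foldl]
  simp

theorem A_iff (sl : List String) (t : String) :
    can_form_target sl t = true ↔ List.Subperm t.toList (sl.map String.toList).flatten := by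
  unfold can_form_target get_char_count
  simp only [PySem.Dict.foldl_insert_getD_add_one_eq_counter]
  rw [List.subperm_ext_iff]
  simp only [PySem.Dict.items_counter, List.all_map, List.all_eq_true,
    PySem.Set.mem_ofList, concat_toList]
  constructor
  · intro h a ha
    have := h a ha
    simp only [Function.comp_apply, PySem.Dict.getD_counter, PySem.Dict.contains_counter] at this
    split_ifs at this with h1 h2
    · exact Nat.cast_le.mp (not_lt.mp h2)
  · intro h a ha
    have hc := h a ha
    have hmem : a ∈ (sl.map String.toList).flatten := by
      have : 0 < (sl.map String.toList).flatten.count a :=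
        lt_of_lt_of_le (List.count_pos_iff.mpr ha) hc
      exact List.count_pos_iff.mp this
    simp only [Function.comp_apply, PySem.Dict.getD_counter, PySem.Dict.contains_counter]
    split_ifs with h1 h2
    · exact absurd h2 (not_lt.mpr (Nat.cast_le.mpr hc))
    · trivial
    · exact h1 (by simpa using hmem)

theorem cft_merge_iff (l₁ l₂ : List Char) : cft_merge l₁ l₂ = true ↔ List.Sublist l₁ l₂ := by
  induction l₂ generalizing l₁ with
  | nil =>
    cases l₁ with
    | nil => simp [cft_merge]
    | cons c cs => simp [cft_merge]
  | cons p ps ih =>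
    cases l₁ with
    | nil => simp [cft_merge]
    | cons c cs =>
      rw [cft_merge]
      by_cases hpc : p = c
      · subst hpc
        simp [ih]
      · rw [if_neg hpc, ih]
        constructor
        · exact fun h => h.cons p
        · intro h
          cases h with
          | cons _ h' => exact h'
          | cons₂ _ _ => exact absurd rfl hpc

theorem B_iff (sl : List String) (t : String) :
    can_form_target_alt sl t = true ↔ List.Subperm t.toList (sl.map String.toList).flatten := by
  unfold can_form_target_alt
  rw [cft_merge_iff]
  have h1 := PySem.List.sorted_perm t.toList (fun x => x) false
  have h2 := PySem.List.sorted_perm ((sl.map String.toList).flatten) (fun x => x) false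
  constructor
  · intro h
    exact h2.subperm_left.mp (h1.subperm_right.mp h.subperm)
  · intro h
    apply List.sublist_of_subperm_of_pairwise (r := (· ≤ ·))
    · exact h1.subperm_right.mpr (h2.subperm_left.mpr h)
    · exact PySem.List.sorted_pairwise t.toList (fun x => x)
    · exact PySem.List.sorted_pairwise ((sl.map String.toList).flatten) (fun x => x)

-- ===== VERDICT (by name: the statement is the Claim_ definition above) =====
theorem can_form_target_spec : Claim_equal_can_form_target := by
  intro sl t _
  unfold Spec_can_form_target
  rcases hb : can_form_target_alt sl t with _ | _
  · rcases ha : can_form_target sl t with _ | _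
    · rfl
    · exact absurd ((B_iff sl t).mpr ((A_iff sl t).mp ha)) (by simp [hb])
  · exact (A_iff sl t).mpr ((B_iff sl t).mp hb)
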